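-- pv_equiv track=rewrite | github.com/Wangsq37/LongCodeUnderstanding | conftest_disable_tracking.py | _disable_tracking_functions
-- ===== SOURCE A (Python) =====
-- def _disable_tracking_functions(content: str) -> str:
--     """
--     禁用调用链跟踪函数
--     """
--     lines = content.split('\n')
--     modified_lines = []
--     i = 0
--
--     while i < len(lines):
--         line = lines[i]
--
--         # 检查是否是pytest_runtest_protocol函数
--         if 'def pytest_runtest_protocol(' in line:
--             modified_lines.append(line)
--             modified_lines.append('    # Call chain tracking disabled during rewrite phase')
--             modified_lines.append('    yield')
--             modified_lines.append('    return')
--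
--             # 跳过函数体直到函数结束
--             i += 1
--             indent_level = len(line) - len(line.lstrip())
--             while i < len(lines):
--                 current_line = lines[i]
--                 if current_line.strip() and len(current_line) - len(current_line.lstrip()) <= indent_level:
--                     break
--                 i += 1
--             continue
--
--         # 检查是否是pytest_sessionfinish函数
--         elif 'def pytest_sessionfinish(' in line:
--             modified_lines.append(line)
--             modified_lines.append('    # Call chain tracking disabled during rewrite phase')
--             modified_lines.append('    return')
--
--             # 跳过函数体直到函数结束
--             i += 1
--             indent_level = len(line) - len(line.lstrip())
--             while i < len(lines):
--                 current_line = lines[i]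
--                 if current_line.strip() and len(current_line) - len(current_line.lstrip()) <= indent_level:
--                     break
--                 i += 1
--             continue
--
--         else:
--             modified_lines.append(line)
--             i += 1
--
--     return '\n'.join(modified_lines)
-- ===== SOURCE B (Python) =====
-- def _disable_tracking_functions(content: str) -> str:
--     # Segment-based rewrite: repeatedly SEARCH for the next target header,
--     # copy the whole untouched segment before it by slicing, emit the fixed
--     # replacement, then search for the end of that function's body and slice
--     # the remainder off -- no line-by-line scan loop with per-line state.
--     H1 = 'def pytest_runtest_protocol('
--     H2 = 'def pytest_sessionfinish('
--     rest = content.split('\n')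
--     out = []
--     while True:
--         idx = next((k for k, l in enumerate(rest) if H1 in l or H2 in l), None)
--         if idx is None:
--             out.extend(rest)
--             break
--         hdr = rest[idx]
--         out.extend(rest[:idx + 1])
--         out.append('    # Call chain tracking disabled during rewrite phase')
--         if H1 in hdr:
--             out.append('    yield')
--         out.append('    return')
--         lvl = len(hdr) - len(hdr.lstrip())
--         body = rest[idx + 1:]
--         end = next((k for k, l in enumerate(body)
--                     if l.strip() and len(l) - len(l.lstrip()) <= lvl), len(body))
--         rest = body[end:]
--     return '\n'.join(out)
-- ===== Notes on version B (the rewrite author's own statement) =====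
-- stated objective: alternative
-- what changed: Replaced A's line-by-line scan (outer index loop with an inner body-skipping loop) by a segment-based rewrite: repeatedly search for the next target header with next()/enumerate, copy the untouched prefix segment by slicing, emit the replacement, search for the body's end and slice the remainder off, so no per-line scan loop or per-line state survives.
import Mathlib
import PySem

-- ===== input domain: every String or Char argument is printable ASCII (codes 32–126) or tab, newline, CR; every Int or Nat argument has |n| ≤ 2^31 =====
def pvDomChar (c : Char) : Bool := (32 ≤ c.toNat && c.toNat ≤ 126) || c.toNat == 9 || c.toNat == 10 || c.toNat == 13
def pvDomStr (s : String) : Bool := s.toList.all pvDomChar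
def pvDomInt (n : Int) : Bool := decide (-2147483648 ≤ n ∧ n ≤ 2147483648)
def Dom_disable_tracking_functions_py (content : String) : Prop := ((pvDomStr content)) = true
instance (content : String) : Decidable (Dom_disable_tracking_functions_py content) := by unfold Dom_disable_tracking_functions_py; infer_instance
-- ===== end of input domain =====

-- B replaces A's line-by-line scan (outer index loop + inner body-skipping loop) by a
-- segment-based rewrite: search for the next header, slice off the untouched segment,
-- emit the replacement, search for the body's end, slice, repeat; objective: alternative.

-- shared string literals of the Python source
def pvHdr1 : List Char := "def pytest_runtest_protocol(".toList
def pvHdr2 : List Char := "def pytest_sessionfinish(".toList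
def pvC1 : List Char := "    # Call chain tracking disabled during rewrite phase".toList
def pvC2 : List Char := "    yield".toList
def pvC3 : List Char := "    return".toList

-- ===== PORT A =====
-- len(line) - len(line.lstrip())
def pvIndentA (l : List Char) : Nat := l.length - (PySem.Chars.lstrip l).length

-- A's inner while loop: advance until a non-blank line of indent ≤ lvl (returned) or end
def pvSkipA (lvl : Nat) : List (List Char) → List (List Char)
  | [] => []
  | l :: ls =>
      if (PySem.Chars.strip l).isEmpty = false ∧ pvIndentA l ≤ lvl then l :: ls
      else pvSkipA lvl ls

theorem pvSkipA_length_le (lvl : Nat) (ls : List (List Char)) :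
    (pvSkipA lvl ls).length ≤ ls.length := by
  induction ls with
  | nil => simp [pvSkipA]
  | cons l ls ih => simp only [pvSkipA]; split
                    · simp
                    · simpa using Nat.le_succ_of_le ih

-- A's outer while loop over the line index, as recursion on the remaining suffix
def pvLoopA (lines : List (List Char)) (acc : List (List Char)) : List (List Char) :=
  match lines with
  | [] => acc
  | line :: rest =>
      if PySem.Chars.isIn pvHdr1 line then
        pvLoopA (pvSkipA (pvIndentA line) rest) (acc ++ [line, pvC1, pvC2, pvC3])
      else if PySem.Chars.isIn pvHdr2 line then
        pvLoopA (pvSkipA (pvIndentA line) rest) (acc ++ [line, pvC1, pvC3])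
      else
        pvLoopA rest (acc ++ [line])
termination_by lines.length
decreasing_by
  · have := pvSkipA_length_le (pvIndentA line) rest; simp; omega
  · have := pvSkipA_length_le (pvIndentA line) rest; simp; omega
  · simp

def disable_tracking_functions_py (content : String) : String :=
  String.ofList (PySem.Chars.join ['\n'] (pvLoopA (PySem.Chars.splitOn content.toList ['\n']) []))

-- ===== PORT B =====
def pvIndentB (l : List Char) : Nat := l.length - (PySem.Chars.lstrip l).length

def pvIsHdr (l : List Char) : Bool :=
  PySem.Chars.isIn pvHdr1 l || PySem.Chars.isIn pvHdr2 l

def pvIsEnd (lvl : Nat) (l : List Char) : Bool :=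
  !(PySem.Chars.strip l).isEmpty && decide (pvIndentB l ≤ lvl)

-- next((k for k, l in enumerate(rest) if H1 in l or H2 in l), None)
def pvFindHdr : List (List Char) → Option Nat
  | [] => none
  | l :: ls => if pvIsHdr l then some 0 else (pvFindHdr ls).map (· + 1)

-- next((k for k, l in enumerate(body) if …), len(body))
def pvFindEnd (lvl : Nat) : List (List Char) → Nat
  | [] => 0
  | l :: ls => if pvIsEnd lvl l then 0 else pvFindEnd lvl ls + 1

theorem pvFindHdr_lt {ls : List (List Char)} {idx : Nat}
    (h : pvFindHdr ls = some idx) : idx < ls.length := by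
  induction ls generalizing idx with
  | nil => simp [pvFindHdr] at h
  | cons l ls ih =>
      simp only [pvFindHdr] at h
      split at h
      · cases h; simp
      · rcases Option.map_eq_some_iff.mp h with ⟨k, hk, rfl⟩
        have := ih hk; simp; omega

-- B's while loop: one iteration per segment
def pvLoopB (rest out : List (List Char)) : List (List Char) :=
  match h : pvFindHdr rest with
  | none => out ++ rest
  | some idx =>
      let hdr := rest.getD idx []
      let body := rest.drop (idx + 1)
      pvLoopB (body.drop (pvFindEnd (pvIndentB hdr) body))
        (out ++ rest.take (idx + 1) ++ [pvC1] ++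
          (if PySem.Chars.isIn pvHdr1 hdr then [pvC2] else []) ++ [pvC3])
termination_by rest.length
decreasing_by
  have := pvFindHdr_lt h
  simp only [List.length_drop]
  omega

def disable_tracking_functions_py_alt (content : String) : String :=
  String.ofList (PySem.Chars.join ['\n']
    (pvLoopB (PySem.Chars.splitOn content.toList ['\n']) []))

-- ===== PRECONDITION & SPEC =====
def Spec_disable_tracking_functions_py (content : String) (out : String) : Prop := out = disable_tracking_functions_py_alt content
instance (content : String) (out : String) : Decidable (Spec_disable_tracking_functions_py content out) := by unfold Spec_disable_tracking_functions_py; infer_instance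

-- ===== CLAIM (what is proved, stated in full; the proofs are below) =====
def Claim_equal_disable_tracking_functions_py : Prop := ∀ (content : String), Dom_disable_tracking_functions_py content → Spec_disable_tracking_functions_py content (disable_tracking_functions_py content)

-- ===== LEMMAS AND PROOFS =====

-- A's inner skip loop lands exactly at B's computed end offset
theorem pvSkipA_eq_drop (lvl : Nat) (ls : List (List Char)) :
    pvSkipA lvl ls = ls.drop (pvFindEnd lvl ls) := by
  induction ls with
  | nil => simp [pvSkipA, pvFindEnd]
  | cons l ls ih =>
      by_cases h : (PySem.Chars.strip l).isEmpty = false ∧ pvIndentA l ≤ lvl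
      · have hb : pvIsEnd lvl l = true := by
          rcases h with ⟨h1, h2⟩
          unfold pvIsEnd
          rw [h1]
          simpa [pvIndentB, pvIndentA] using h2
        simp only [pvSkipA, pvFindEnd]
        rw [if_pos h, if_pos hb]
        simp
      · have hb : pvIsEnd lvl l = false := by
          unfold pvIsEnd pvIndentB
          by_cases h1 : (PySem.Chars.strip l).isEmpty = true
          · simp [h1]
          · have h1' : (PySem.Chars.strip l).isEmpty = false := by simpa using h1
            have h2 : ¬ pvIndentA l ≤ lvl := fun h2 => h ⟨h1', h2⟩
            simp [h1', pvIndentA] at h2 ⊢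
            omega
        simp only [pvSkipA, pvFindEnd, if_neg h, hb, Bool.false_eq_true,
          if_false, List.drop_succ_cons]
        exact ih

-- unfolding B when no header remains
theorem pvLoopB_none (rest out : List (List Char)) (h : pvFindHdr rest = none) :
    pvLoopB rest out = out ++ rest := by
  rw [pvLoopB]
  split
  · rfl
  · rename_i idx h'; rw [h] at h'; cases h'

-- unfolding B at the found header index
theorem pvLoopB_some (rest out : List (List Char)) (idx : Nat)
    (h : pvFindHdr rest = some idx) :
    pvLoopB rest out =
      pvLoopB ((rest.drop (idx + 1)).drop
          (pvFindEnd (pvIndentB (rest.getD idx [])) (rest.drop (idx + 1))))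
        (out ++ rest.take (idx + 1) ++ [pvC1] ++
          (if PySem.Chars.isIn pvHdr1 (rest.getD idx []) then [pvC2] else []) ++ [pvC3]) := by
  rw [pvLoopB]
  split
  · rename_i h'; rw [h] at h'; cases h'
  · rename_i idx' h'
    rw [h] at h'
    cases h'
    rfl

-- unfolding B at a header head
theorem pvLoopB_hdr (l : List Char) (ls out : List (List Char))
    (h : pvIsHdr l = true) :
    pvLoopB (l :: ls) out =
      pvLoopB (ls.drop (pvFindEnd (pvIndentB l) ls))
        (out ++ [l] ++ [pvC1] ++
          (if PySem.Chars.isIn pvHdr1 l then [pvC2] else []) ++ [pvC3]) := by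
  have hf : pvFindHdr (l :: ls) = some 0 := by simp [pvFindHdr, h]
  rw [pvLoopB_some (l :: ls) out 0 hf]
  simp

-- pushing a non-header line from the segment into the accumulator
theorem pvLoopB_shift (l : List Char) (ls out : List (List Char))
    (h : pvIsHdr l = false) :
    pvLoopB (l :: ls) out = pvLoopB ls (out ++ [l]) := by
  have hf : pvFindHdr (l :: ls) = (pvFindHdr ls).map (· + 1) := by
    simp [pvFindHdr, h]
  cases hls : pvFindHdr ls with
  | none =>
      rw [pvLoopB_none ls (out ++ [l]) hls,
        pvLoopB_none (l :: ls) out (by rw [hf, hls]; rfl)]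
      simp
  | some idx =>
      rw [pvLoopB_some ls (out ++ [l]) idx hls,
        pvLoopB_some (l :: ls) out (idx + 1) (by rw [hf, hls]; rfl)]
      simp [List.take_succ_cons, List.drop_succ_cons, List.append_assoc]

-- A's outer loop equals B's segment loop
theorem pvLoopA_eq_loopB (lines : List (List Char)) (acc : List (List Char)) :
    pvLoopA lines acc = pvLoopB lines acc := by
  induction lines, acc using pvLoopA.induct with
  | case1 acc => rw [pvLoopA, pvLoopB_none [] acc (by rfl)]; simp
  | case2 acc line rest h ih =>
      rw [pvLoopA]
      simp only [if_pos h]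
      rw [ih, pvSkipA_eq_drop, pvLoopB_hdr line rest acc (by simp [pvIsHdr, h])]
      simp [h, pvIndentA, pvIndentB, List.append_assoc]
  | case3 acc line rest h1 h2 ih =>
      rw [pvLoopA]
      simp only [if_neg h1, if_pos h2]
      rw [ih, pvSkipA_eq_drop, pvLoopB_hdr line rest acc (by simp [pvIsHdr, h2])]
      have h1' : PySem.Chars.isIn pvHdr1 line = false := by
        revert h1; cases PySem.Chars.isIn pvHdr1 line <;> simp
      simp [h1', pvIndentA, pvIndentB, List.append_assoc]
  | case4 acc line rest h1 h2 ih =>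
      rw [pvLoopA]
      simp only [if_neg h1, if_neg h2]
      have h1' : PySem.Chars.isIn pvHdr1 line = false := by
        revert h1; cases PySem.Chars.isIn pvHdr1 line <;> simp
      have h2' : PySem.Chars.isIn pvHdr2 line = false := by
        revert h2; cases PySem.Chars.isIn pvHdr2 line <;> simp
      rw [ih, pvLoopB_shift line rest acc (by simp [pvIsHdr, h1', h2'])]

-- ===== VERDICT (by name: the statement is the Claim_ definition above) =====
theorem disable_tracking_functions_py_spec : Claim_equal_disable_tracking_functions_py := by
  intro content _
  unfold Spec_disable_tracking_functions_py disable_tracking_functions_py disable_tracking_functions_py_alt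
  rw [pvLoopA_eq_loopB]
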